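-- pv_equiv track=rewrite | github.com/youej/aviation_anomaly | workflow_python/explainability/perturbation.py | create_segments
-- ===== SOURCE A (Python) =====
-- def create_segments(timesteps, n_segments=10):
--     """
--     Divide timesteps into approximately equal segments.
--
--     Args:
--         timesteps: Total number of timesteps (e.g., 81).
--         n_segments: Number of segments to create.
--
--     Returns:
--         segments: List of (start, end) tuples for each segment.
--     """
--     segment_size = timesteps // n_segments
--     remainder = timesteps % n_segments
--     segments = []
--     start = 0
--     for i in range(n_segments):
--         end = start + segment_size + (1 if i < remainder else 0)
--         segments.append((start, end))
--         start = end
--     return segments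
-- ===== SOURCE B (Python) =====
-- def create_segments(timesteps, n_segments=10):
--     q, r = divmod(timesteps, n_segments)
--     def b(k):
--         return k * q + min(k, r)
--     return [(b(i), b(i + 1)) for i in range(n_segments)]
-- ===== Notes on version B (the rewrite author's own statement) =====
-- stated objective: alternative
-- what changed: Replaces the running start/end accumulator loop with a closed-form boundary function b(k) = k*q + min(k, r) and builds each segment directly from its index.
import Mathlib
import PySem

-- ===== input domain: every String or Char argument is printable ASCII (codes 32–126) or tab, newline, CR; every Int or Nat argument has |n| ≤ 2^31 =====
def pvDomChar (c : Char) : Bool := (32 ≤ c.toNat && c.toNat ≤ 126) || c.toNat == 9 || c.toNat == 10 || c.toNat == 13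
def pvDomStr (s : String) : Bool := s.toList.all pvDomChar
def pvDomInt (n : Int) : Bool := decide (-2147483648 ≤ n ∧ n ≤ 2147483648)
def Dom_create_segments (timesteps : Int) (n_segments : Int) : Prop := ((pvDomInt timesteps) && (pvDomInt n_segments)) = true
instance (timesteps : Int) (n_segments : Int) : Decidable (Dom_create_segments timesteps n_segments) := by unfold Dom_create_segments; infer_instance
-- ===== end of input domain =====

-- B replaces A's running start/end accumulator with the closed-form boundary b(k) = k*q + min(k,r); same O(n) cost.

-- ===== PORT A =====
def create_segments (timesteps : Int) (n_segments : Int) : List (Int × Int) :=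
  let segment_size := PySem.Int.floordiv timesteps n_segments
  let remainder := PySem.Int.mod timesteps n_segments
  let st := (PySem.List.pyRange 0 n_segments 1).foldl
    (fun (st : List (Int × Int) × Int) i =>
      let e := st.2 + segment_size + (if i < remainder then 1 else 0)
      (st.1 ++ [(st.2, e)], e)) ([], 0)
  st.1

-- ===== PORT B =====
def create_segments_alt (timesteps : Int) (n_segments : Int) : List (Int × Int) :=
  let q := PySem.Int.floordiv timesteps n_segments
  let r := PySem.Int.mod timesteps n_segments
  let b := fun (k : Int) => k * q + min k r
  (PySem.List.pyRange 0 n_segments 1).map (fun i => (b i, b (i + 1)))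

-- ===== PRECONDITION & SPEC =====
-- Python's '//' and '%' raise ZeroDivisionError when n_segments = 0; Pre_ excludes exactly that.
def Pre_create_segments (timesteps : Int) (n_segments : Int) : Prop := n_segments ≠ 0
instance (timesteps : Int) (n_segments : Int) : Decidable (Pre_create_segments timesteps n_segments) := by unfold Pre_create_segments; infer_instance
def pvWitness_create_segments : Int × Int := (81, 10)

def Spec_create_segments (timesteps : Int) (n_segments : Int) (out : List (Int × Int)) : Prop := out = create_segments_alt timesteps n_segments
instance (timesteps : Int) (n_segments : Int) (out : List (Int × Int)) : Decidable (Spec_create_segments timesteps n_segments out) := by unfold Spec_create_segments; infer_instance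

-- ===== CLAIM (what is proved, stated in full; the proofs are below) =====
def Claim_equal_create_segments : Prop := ∀ (timesteps : Int) (n_segments : Int), Dom_create_segments timesteps n_segments → Pre_create_segments timesteps n_segments → Spec_create_segments timesteps n_segments (create_segments timesteps n_segments)

-- ===== LEMMAS AND PROOFS =====

-- A's loop over range(0..m) with running start, versus B's closed-form boundary b.
theorem csLoop (q r : Int) (m : Nat) :
    (PySem.List.pyRange 0 (m : Int) 1).foldl
      (fun (st : List (Int × Int) × Int) i =>
        let e := st.2 + q + (if i < r then 1 else 0)
        (st.1 ++ [(st.2, e)], e)) ([], min 0 r) =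
    ((PySem.List.pyRange 0 (m : Int) 1).map
      (fun i => (i * q + min i r, (i + 1) * q + min (i + 1) r)),
     (m : Int) * q + min (m : Int) r) := by
  induction m with
  | zero => simp [PySem.List.pyRange_one_eq_nil]
  | succ n ih =>
    have h : ((n : Int) + 1) = ((n + 1 : Nat) : Int) := by push_cast; ring
    rw [← h, PySem.List.pyRange_one_succ_right (by positivity)]
    rw [List.foldl_append, List.map_append, ih]
    simp only [List.foldl_cons, List.foldl_nil, List.map_cons, List.map_nil]
    have hb : ((n : Int) + 1) * q + min ((n : Int) + 1) r =
        (n : Int) * q + min (n : Int) r + q + (if (n : Int) < r then 1 else 0) := by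
      by_cases hlt : (n : Int) < r
      · rw [min_eq_left (by omega), min_eq_left (by omega), if_pos hlt]; ring
      · rw [min_eq_right (by omega), min_eq_right (by omega), if_neg hlt]; ring
    rw [hb]

theorem create_segments_spec : Claim_equal_create_segments := by
  intro t n _ hn
  unfold Spec_create_segments create_segments create_segments_alt
  rcases lt_trichotomy n 0 with h | h | h
  · simp [PySem.List.pyRange_one_eq_nil (by omega : n ≤ 0)]
  · exact absurd h hn
  · have hr : 0 ≤ PySem.Int.mod t n := by
      rw [PySem.Int.mod_eq_emod_of_pos h]; exact Int.emod_nonneg t (by omega)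
    have h1 := csLoop (PySem.Int.floordiv t n) (PySem.Int.mod t n) n.toNat
    rw [show min 0 (PySem.Int.mod t n) = 0 by omega] at h1
    rw [show ((n.toNat : Nat) : Int) = n by omega] at h1
    simp only [h1]
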